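-- pv_equiv track=rewrite | github.com/alancast/LeetCodeProblems | python/easy/1176_diet_plan_performance.py | dietPlanPerformance
-- ===== SOURCE A (Python) =====
-- from typing import List
--
-- def dietPlanPerformance(calories: List[int], k: int, lower: int, upper: int) -> int:
--     n = len(calories)
--
--     points = 0
--     running_sum = 0
--     # Compute running sum of first k
--     for i in range(k):
--         running_sum += calories[i]
--
--     # See if first k subarray is points worthy
--     if running_sum < lower:
--         points -= 1
--     if running_sum > upper:
--         points += 1
--
--     # Check all k len subarrays to see points
--     for i in range(k, n):
--         # Add new one and roll out last one
--         running_sum -= calories[i-k]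
--         running_sum += calories[i]
--
--         # See if this k subarray is points worthy
--         if running_sum < lower:
--             points -= 1
--         if running_sum > upper:
--             points += 1
--
--     return points
-- ===== SOURCE B (Python) =====
-- from typing import List
--
-- def dietPlanPerformance(calories: List[int], k: int, lower: int, upper: int) -> int:
--     prefix = [0]
--     for c in calories:
--         prefix.append(prefix[-1] + c)
--     points = 0
--     for i in range(len(calories) - k + 1):
--         s = prefix[i + k] - prefix[i]
--         if s < lower:
--             points -= 1
--         if s > upper:
--             points += 1
--     return points
-- ===== Notes on version B (the rewrite author's own statement) =====
-- stated objective: alternative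
-- what changed: Replaced A's incrementally-maintained sliding running sum (special-cased first window plus a rolling update loop) with a precomputed prefix-sum table and one uniform pass over all window starts computing each window sum as P[i+k]-P[i].
import Mathlib
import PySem

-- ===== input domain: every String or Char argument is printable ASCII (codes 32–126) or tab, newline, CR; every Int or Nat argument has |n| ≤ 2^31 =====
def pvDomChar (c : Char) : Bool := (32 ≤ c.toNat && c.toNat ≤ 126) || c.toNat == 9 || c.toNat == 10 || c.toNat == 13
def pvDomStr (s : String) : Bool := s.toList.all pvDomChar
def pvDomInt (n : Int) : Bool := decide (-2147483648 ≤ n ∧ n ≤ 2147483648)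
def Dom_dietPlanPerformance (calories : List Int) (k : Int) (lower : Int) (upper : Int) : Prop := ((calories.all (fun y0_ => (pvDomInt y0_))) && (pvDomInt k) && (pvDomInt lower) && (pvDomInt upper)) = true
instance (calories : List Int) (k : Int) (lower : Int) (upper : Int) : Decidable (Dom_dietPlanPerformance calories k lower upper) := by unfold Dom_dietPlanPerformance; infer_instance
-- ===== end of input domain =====

-- B replaces A's special-cased first window + rolling running-sum update with a prefix-sum
-- table and one uniform pass over all window starts (alternative decomposition, same O(n)).


-- ===== PORT A =====
def dietPlanPerformance (calories : List Int) (k : Int) (lower : Int) (upper : Int) : Int :=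
  let n : Int := (calories.length : Int)
  -- running sum of first k
  let running_sum : Int :=
    (PySem.List.pyRange 0 k 1).foldl (fun s i => s + PySem.List.pyGetD calories i 0) 0
  -- points of the first window
  let points : Int := if running_sum < lower then 0 - 1 else 0
  let points : Int := if running_sum > upper then points + 1 else points
  -- rolling loop over i in range(k, n), state (running_sum, points)
  let st : Int × Int :=
    (PySem.List.pyRange k n 1).foldl
      (fun (st : Int × Int) i =>
        let rs := st.1 - PySem.List.pyGetD calories (i - k) 0 + PySem.List.pyGetD calories i 0
        let p := if rs < lower then st.2 - 1 else st.2
        let p := if rs > upper then p + 1 else p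
        (rs, p)) (running_sum, points)
  st.2

-- ===== PORT B =====
-- prefix-sum table: prefix = [0]; for c in calories: prefix.append(prefix[-1] + c)
def pvPrefix (calories : List Int) : List Int :=
  calories.foldl (fun p c => p ++ [PySem.List.pyGetD p (-1) 0 + c]) [0]

def dietPlanPerformance_alt (calories : List Int) (k : Int) (lower : Int) (upper : Int) : Int :=
  let pre := pvPrefix calories
  (PySem.List.pyRange 0 ((calories.length : Int) - k + 1) 1).foldl
    (fun points i =>
      let s := PySem.List.pyGetD pre (i + k) 0 - PySem.List.pyGetD pre i 0
      let points := if s < lower then points - 1 else points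
      if s > upper then points + 1 else points) 0

-- ===== PRECONDITION & SPEC =====
-- Pre_ is the task's natural domain 0 ≤ k ≤ len(calories): for every k outside it
-- (k < 0 or k > len(calories)) the Python A raises IndexError and returns nothing.
def Pre_dietPlanPerformance (calories : List Int) (k : Int) (lower : Int) (upper : Int) : Prop :=
  0 ≤ k ∧ k ≤ (calories.length : Int)
instance (calories : List Int) (k : Int) (lower : Int) (upper : Int) : Decidable (Pre_dietPlanPerformance calories k lower upper) := by unfold Pre_dietPlanPerformance; infer_instance

def pvWitness_dietPlanPerformance : List Int × Int × Int × Int := ([1, 2, 3, 4], 2, 3, 6)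

def Spec_dietPlanPerformance (calories : List Int) (k : Int) (lower : Int) (upper : Int) (out : Int) : Prop := out = dietPlanPerformance_alt calories k lower upper
instance (calories : List Int) (k : Int) (lower : Int) (upper : Int) (out : Int) : Decidable (Spec_dietPlanPerformance calories k lower upper out) := by unfold Spec_dietPlanPerformance; infer_instance

-- ===== CLAIM (what is proved, stated in full; the proofs are below) =====
def Claim_equal_dietPlanPerformance : Prop := ∀ (calories : List Int) (k : Int) (lower : Int) (upper : Int), Dom_dietPlanPerformance calories k lower upper → Pre_dietPlanPerformance calories k lower upper → Spec_dietPlanPerformance calories k lower upper (dietPlanPerformance calories k lower upper)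


-- ===== LEMMAS AND PROOFS =====

-- points delta of one window of sum s
def pvDelta (lower upper s : Int) : Int :=
  (if s < lower then -1 else 0) + (if s > upper then 1 else 0)

-- sum of the k-length window starting at j
def pvW (calories : List Int) (kn j : Nat) : Int := ((calories.drop j).take kn).sum

lemma pvPrefix_eq (calories : List Int) :
    pvPrefix calories = (List.range (calories.length + 1)).map (fun j => (calories.take j).sum) := by
  induction calories using List.reverseRecOn with
  | nil => simp [pvPrefix]
  | append_singleton cs c ih =>
    have step : pvPrefix (cs ++ [c]) =
        pvPrefix cs ++ [PySem.List.pyGetD (pvPrefix cs) (-1) 0 + c] := by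
      simp [pvPrefix]
    rw [step, ih]
    have hlast : PySem.List.pyGetD
        ((List.range (cs.length + 1)).map (fun j => (cs.take j).sum)) (-1) 0 = cs.sum := by
      have : (List.range (cs.length + 1)).map (fun j => (cs.take j).sum) =
          (List.range cs.length).map (fun j => (cs.take j).sum) ++ [(cs.take cs.length).sum] := by
        rw [List.range_succ, List.map_append]; simp
      rw [this, PySem.List.pyGetD_neg_one_append_singleton]
      simp
    rw [hlast]
    simp only [List.length_append, List.length_cons, List.length_nil]
    rw [List.range_succ (n := cs.length + 1), List.map_append]
    congr 1
    · apply List.map_congr_left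
      intro j hj
      rw [List.mem_range] at hj
      rw [List.take_append_of_le_length (by omega)]
    · simp [List.take_of_length_le]

lemma pvPrefix_getD (calories : List Int) (j : Nat) (hj : j ≤ calories.length) :
    PySem.List.pyGetD (pvPrefix calories) (j : Int) 0 = (calories.take j).sum := by
  rw [PySem.List.pyGetD_natCast, pvPrefix_eq]
  rw [List.getD_eq_getElem _ _ (by simpa using by omega)]
  simp

lemma pvW_eq_sub (calories : List Int) (kn j : Nat) :
    pvW calories kn j = (calories.take (j + kn)).sum - (calories.take j).sum := by
  rw [List.take_add, List.sum_append]; simp [pvW]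

-- sliding-window step: shift the window one to the right
lemma pvW_slide (calories : List Int) (kn t : Nat) (h : kn + t < calories.length) :
    pvW calories kn t + calories.getD (kn + t) 0 = pvW calories kn (t + 1) + calories.getD t 0 := by
  rw [pvW_eq_sub, pvW_eq_sub,
    List.getD_eq_getElem _ _ (by omega), List.getD_eq_getElem _ _ (by omega)]
  have e : t + 1 + kn = (t + kn) + 1 := by omega
  rw [e, List.sum_take_succ _ _ (by omega), List.sum_take_succ _ _ (by omega)]
  have : calories[kn + t] = calories[t + kn] := by congr 1; omega
  rw [this]; ring

-- the two sequential ifs of either port are pvDelta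
lemma pvDelta_ifs (lower upper s p : Int) :
    (if s > upper then (if s < lower then p - 1 else p) + 1 else (if s < lower then p - 1 else p))
      = p + pvDelta lower upper s := by
  unfold pvDelta; split_ifs <;> ring

-- (range m).map getD = take m
lemma map_getD_range (cs : List Int) (m : Nat) (h : m ≤ cs.length) :
    (List.range m).map (fun j => cs.getD j 0) = cs.take m := by
  induction m with
  | zero => simp
  | succ t ih =>
    rw [List.range_succ, List.map_append, ih (by omega),
      ← List.take_concat_get (by omega : t < cs.length), List.concat_eq_append]
    simp [List.getElem?_eq_getElem (by omega : t < cs.length)]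

-- B's value under Pre_: sum of deltas over all n-k+1 windows
lemma alt_eq_sum (calories : List Int) (k lower upper : Int)
    (hk0 : 0 ≤ k) (hkn : k ≤ (calories.length : Int)) :
    dietPlanPerformance_alt calories k lower upper =
      ((List.range (calories.length - k.toNat + 1)).map
        (fun j => pvDelta lower upper (pvW calories k.toNat j))).sum := by
  obtain ⟨kn, rfl⟩ : ∃ m : Nat, k = (m : Int) := ⟨k.toNat, (Int.toNat_of_nonneg hk0).symm⟩
  have hkn' : kn ≤ calories.length := by exact_mod_cast hkn
  simp only [dietPlanPerformance_alt]
  have hb : (calories.length : Int) - (kn : Int) + 1 = ((calories.length - kn + 1 : Nat) : Int) := by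
    push_cast [Nat.sub_add_cancel hkn']; omega
  rw [hb, PySem.List.pyRange_zero_natCast, List.foldl_map]
  rw [PySem.List.foldl_congr_mem _ _
      (fun p j => p + pvDelta lower upper (pvW calories kn j)) 0 ?hcongr]
  case hcongr =>
    intro acc j hj
    rw [List.mem_range] at hj
    have e1 : ((j : Int) + (kn : Int)) = ((j + kn : Nat) : Int) := by push_cast; ring
    rw [e1, pvPrefix_getD _ _ (by omega), pvPrefix_getD _ _ (by omega)]
    rw [← pvW_eq_sub]
    exact pvDelta_ifs lower upper _ acc
  rw [PySem.List.foldl_add]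
  simp

-- A's value under Pre_: the same sum, by the sliding-window loop invariant
lemma loopA (cs : List Int) (kn : Nat) (lower upper : Int) (hkn : kn ≤ cs.length)
    (t : Nat) (ht : t ≤ cs.length - kn) (p0 : Int) :
    List.foldl (fun (st : Int × Int) (u : Nat) =>
        (st.1 - PySem.List.pyGetD cs (((kn : Int) + (u : Int)) - (kn : Int)) 0
              + PySem.List.pyGetD cs ((kn : Int) + (u : Int)) 0,
         if st.1 - PySem.List.pyGetD cs (((kn : Int) + (u : Int)) - (kn : Int)) 0
              + PySem.List.pyGetD cs ((kn : Int) + (u : Int)) 0 > upper then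
           (if st.1 - PySem.List.pyGetD cs (((kn : Int) + (u : Int)) - (kn : Int)) 0
              + PySem.List.pyGetD cs ((kn : Int) + (u : Int)) 0 < lower then st.2 - 1 else st.2) + 1
         else
           (if st.1 - PySem.List.pyGetD cs (((kn : Int) + (u : Int)) - (kn : Int)) 0
              + PySem.List.pyGetD cs ((kn : Int) + (u : Int)) 0 < lower then st.2 - 1 else st.2)))
      (pvW cs kn 0, p0) (List.range t)
      = (pvW cs kn t,
         p0 + ((List.range t).map (fun u => pvDelta lower upper (pvW cs kn (u + 1)))).sum) := by
  induction t with
  | zero => simp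
  | succ t ih =>
    rw [List.range_succ, List.foldl_append, ih (by omega)]
    have e1 : ((kn : Int) + (t : Int)) - (kn : Int) = (t : Int) := by ring
    have e2 : ((kn : Int) + (t : Int)) = ((kn + t : Nat) : Int) := by push_cast; ring
    simp only [List.foldl_cons, List.foldl_nil, e1]
    simp only [e2, PySem.List.pyGetD_natCast]
    have hrs : pvW cs kn t - cs.getD t 0 + cs.getD (kn + t) 0 = pvW cs kn (t + 1) := by
      have := pvW_slide cs kn t (by omega)
      omega
    rw [hrs, pvDelta_ifs lower upper (pvW cs kn (t + 1))]
    rw [List.map_append, List.sum_append]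
    simp; ring

lemma a_eq_sum (calories : List Int) (k lower upper : Int)
    (hk0 : 0 ≤ k) (hkn : k ≤ (calories.length : Int)) :
    dietPlanPerformance calories k lower upper =
      ((List.range (calories.length - k.toNat + 1)).map
        (fun j => pvDelta lower upper (pvW calories k.toNat j))).sum := by
  obtain ⟨kn, rfl⟩ : ∃ m : Nat, k = (m : Int) := ⟨k.toNat, (Int.toNat_of_nonneg hk0).symm⟩
  have hkn' : kn ≤ calories.length := by exact_mod_cast hkn
  simp only [dietPlanPerformance]
  have hfirst : (PySem.List.pyRange 0 (kn : Int) 1).foldl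
      (fun s i => s + PySem.List.pyGetD calories i 0) 0 = pvW calories kn 0 := by
    rw [PySem.List.pyRange_zero_natCast, List.foldl_map]
    rw [PySem.List.foldl_congr_mem _ _ (fun s j => s + calories.getD j 0) 0
        (by intro acc j _; rw [PySem.List.pyGetD_natCast])]
    rw [PySem.List.foldl_add, map_getD_range _ _ hkn']
    simp [pvW]
  rw [hfirst, pvDelta_ifs lower upper (pvW calories kn 0) 0]
  have hrange : PySem.List.pyRange (kn : Int) (calories.length : Int) 1 =
      (List.range (calories.length - kn)).map (fun (u : Nat) => (kn : Int) + (u : Int)) := by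
    rw [PySem.List.pyRange_one]
    have : ((calories.length : Int) - (kn : Int)).toNat = calories.length - kn := by omega
    rw [this]
  rw [hrange, List.foldl_map, loopA calories kn lower upper hkn' (calories.length - kn) le_rfl _]
  simp only [Int.toNat_natCast]
  rw [List.range_succ_eq_map (n := calories.length - kn)]
  simp [Function.comp_def, Nat.succ_eq_add_one]

-- ===== VERDICT (by name: the statement is the Claim_ definition above) =====
theorem dietPlanPerformance_spec : Claim_equal_dietPlanPerformance := by
  intro calories k lower upper _ hpre
  unfold Spec_dietPlanPerformance
  rw [a_eq_sum calories k lower upper hpre.1 hpre.2,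
    alt_eq_sum calories k lower upper hpre.1 hpre.2]
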